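-- pv_equiv track=rewrite | github.com/shenlong2010-unregular/probs | codewar-probs/SubtractProductandSum.py | subtractProductAndSum3
-- ===== SOURCE A (Python) =====
-- def subtractProductAndSum3(n):
--     sum = 0
--     product = 1
--     while n > 0:
--         sum += n%10
--         product *= n%10
--
--         n //= 10
--     return product - sum
-- ===== SOURCE B (Python) =====
-- import math
--
-- def subtractProductAndSum3(n):
--     # decimal representation route: read the digits from str(n) (only when n > 0,
--     # matching the loop's guard), then two library reductions
--     digits = [ord(c) - 48 for c in str(n)] if n > 0 else []
--     return math.prod(digits) - sum(digits)
-- ===== Notes on version B (the rewrite author's own statement) =====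
-- stated objective: alternative
-- what changed: A peels digits arithmetically with %10 and //10 while fusing sum and product into one accumulation loop; B instead reads the digits off the decimal string str(n) (guarded by n > 0, like A's loop condition) and reduces them with math.prod and sum, whose empty-sequence defaults reproduce A's behaviour for non-positive n.
import Mathlib
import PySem

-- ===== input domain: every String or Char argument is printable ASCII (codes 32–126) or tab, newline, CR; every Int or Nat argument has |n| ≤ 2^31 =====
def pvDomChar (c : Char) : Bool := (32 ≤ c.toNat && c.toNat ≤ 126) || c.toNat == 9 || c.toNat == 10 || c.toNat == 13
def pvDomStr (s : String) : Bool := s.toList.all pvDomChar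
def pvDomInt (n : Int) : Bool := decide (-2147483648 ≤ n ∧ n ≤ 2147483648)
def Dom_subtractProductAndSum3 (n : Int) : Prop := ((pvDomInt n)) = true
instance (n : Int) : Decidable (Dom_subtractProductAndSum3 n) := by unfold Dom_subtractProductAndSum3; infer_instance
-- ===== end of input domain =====

-- B replaces A's fused arithmetic %10-//10 loop by reading the digits off the decimal
-- string str(n) and reducing with prod/sum (objective: alternative, same cost).

-- termination measure for A's loop
theorem pvFloordiv10_lt (n : Int) (h : 0 < n) :
    (PySem.Int.floordiv n 10).toNat < n.toNat := by
  rw [PySem.Int.floordiv_eq_ediv_of_pos (by omega)]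
  omega

-- ===== PORT A =====
-- while n > 0: sum += n%10; product *= n%10; n //= 10
def subtractProductAndSum3Loop (n sum product : Int) : Int :=
  if h : 0 < n then
    subtractProductAndSum3Loop (PySem.Int.floordiv n 10)
      (sum + PySem.Int.mod n 10) (product * PySem.Int.mod n 10)
  else product - sum
termination_by n.toNat
decreasing_by exact pvFloordiv10_lt n h

def subtractProductAndSum3 (n : Int) : Int :=
  subtractProductAndSum3Loop n 0 1

-- ===== PORT B =====
-- digits = [ord(c) - 48 for c in str(n)] if n > 0 else []; return math.prod(digits) - sum(digits)
def subtractProductAndSum3_alt (n : Int) : Int :=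
  let digits : List Int :=
    if 0 < n then (PySem.Int.toStr n).toList.map (fun c => (c.toNat : Int) - 48) else []
  digits.prod - digits.sum

-- ===== PRECONDITION & SPEC =====
def Spec_subtractProductAndSum3 (n : Int) (out : Int) : Prop := out = subtractProductAndSum3_alt n
instance (n : Int) (out : Int) : Decidable (Spec_subtractProductAndSum3 n out) := by unfold Spec_subtractProductAndSum3; infer_instance

-- ===== CLAIM (what is proved, stated in full; the proofs are below) =====
def Claim_equal_subtractProductAndSum3 : Prop := ∀ (n : Int), Dom_subtractProductAndSum3 n → Spec_subtractProductAndSum3 n (subtractProductAndSum3 n)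

-- ===== LEMMAS AND PROOFS =====

-- digit character values: the comprehension's ord(c) - 48 recovers the digit
theorem pvDigitChar_val (m : Nat) (h : m < 10) :
    ((Nat.digitChar m).toNat : Int) - 48 = (m : Int) := by
  interval_cases m <;> rfl

-- the Int digit values of str(m) for m : Nat
def pvVals (m : Nat) : List Int :=
  (Nat.toDigits 10 m).map (fun c => (c.toNat : Int) - 48)

theorem pvVals_lt (m : Nat) (h : m < 10) : pvVals m = [(m : Int)] := by
  unfold pvVals
  rw [Nat.toDigits_of_lt_base h]
  simp [pvDigitChar_val m h]

theorem pvVals_ge (m : Nat) (h : 10 ≤ m) :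
    pvVals m = pvVals (m / 10) ++ [((m % 10 : Nat) : Int)] := by
  unfold pvVals
  rw [Nat.toDigits_of_base_le (by norm_num) h]
  simp [pvDigitChar_val (m % 10) (Nat.mod_lt m (by norm_num))]

-- loop invariant: A's loop equals product * prod(vals) - (sum + sum(vals)) over str's digits
theorem pvLoop_eq (k : Nat) : ∀ (m : Nat) (s p : Int), 0 < m → m ≤ k →
    subtractProductAndSum3Loop (m : Int) s p
      = p * (pvVals m).prod - (s + (pvVals m).sum) := by
  induction k with
  | zero => intro m s p hm hk; omega
  | succ k ih =>
    intro m s p hm hk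
    rw [subtractProductAndSum3Loop]
    simp only [show (0:Int) < (m:Int) from by exact_mod_cast hm, dif_pos]
    have hdiv : PySem.Int.floordiv (m : Int) 10 = ((m / 10 : Nat) : Int) := by
      exact_mod_cast PySem.Int.floordiv_natCast m 10
    have hmod : PySem.Int.mod (m : Int) 10 = ((m % 10 : Nat) : Int) := by
      exact_mod_cast PySem.Int.mod_natCast m 10
    rw [hdiv, hmod]
    by_cases h10 : m < 10
    · have hq : m / 10 = 0 := Nat.div_eq_of_lt h10
      have hr : m % 10 = m := Nat.mod_eq_of_lt h10
      rw [hq, hr, subtractProductAndSum3Loop]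
      simp [pvVals_lt m h10]
    · have hq : 0 < m / 10 := Nat.div_pos (by omega) (by norm_num)
      rw [ih (m / 10) _ _ hq (by omega)]
      rw [pvVals_ge m (by omega)]
      simp [List.prod_append, List.sum_append]
      ring

-- str(n) for positive n, reduced to Nat.toDigits
theorem pvToStr_pos (n : Int) (h : 0 < n) :
    (PySem.Int.toStr n).toList = Nat.toDigits 10 n.toNat := by
  rw [PySem.Int.toList_toStr]
  simp [PySem.Int.toChars, show ¬ n < 0 from by omega]

-- ===== VERDICT (by name: the statement is the Claim_ definition above) =====
theorem subtractProductAndSum3_spec : Claim_equal_subtractProductAndSum3 := by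
  intro n _
  unfold Spec_subtractProductAndSum3 subtractProductAndSum3 subtractProductAndSum3_alt
  by_cases h : 0 < n
  · simp only [h, if_pos, pvToStr_pos n h]
    have := pvLoop_eq n.toNat n.toNat 0 1 (by omega) le_rfl
    rw [Int.toNat_of_nonneg (by omega)] at this
    rw [this]
    unfold pvVals
    ring
  · rw [subtractProductAndSum3Loop]
    simp [h]
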